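-- pv_equiv track=rewrite | github.com/nana-moon/SSAFYAlgorithm | 221029_algo/기능 개발.py | solution
-- ===== SOURCE A (Python) =====
-- def solution(progresses, speeds):
--     stack = []
--     answer = []
--     for i in range(len(progresses)):
--
--         sub = 100 - progresses[i]
--         tmp = sub // speeds[i]
--         if sub % speeds[i] != 0:
--             tmp += 1
--         stack.append(tmp)
--
--     cnt = 1
--     core = stack[0]
--     for i in range(1, len(stack)):
--         if stack[i] <= core:
--             cnt += 1
--         else:
--             answer.append(cnt)
--             cnt = 1
--             core = stack[i]
--
--     answer.append(cnt)
--
--     return answer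
-- ===== SOURCE B (Python) =====
-- def solution(progresses, speeds):
--     # effective finish day of task i = max over j<=i of its own ceil day (earlier tasks block later ones)
--     effective = []
--     m = None
--     for p, s in zip(progresses, speeds):
--         d = -((p - 100) // s)
--         if m is None or d > m:
--             m = d
--         effective.append(m)
--     # tasks deploy together iff they share the same effective day; dict keeps first-appearance order
--     counts = {}
--     for e in effective:
--         counts[e] = counts.get(e, 0) + 1
--     return list(counts.values())
-- ===== Notes on version B (the rewrite author's own statement) =====
-- stated objective: alternative
-- what changed: B replaces A's run-counting accumulator entirely: it assigns every task its effective deployment day as a prefix maximum of the per-task ceil days, then counts tasks per effective day with an insertion-ordered dict and returns the dict's values, so no group-boundary/run-length scan exists at all.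
import Mathlib
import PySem

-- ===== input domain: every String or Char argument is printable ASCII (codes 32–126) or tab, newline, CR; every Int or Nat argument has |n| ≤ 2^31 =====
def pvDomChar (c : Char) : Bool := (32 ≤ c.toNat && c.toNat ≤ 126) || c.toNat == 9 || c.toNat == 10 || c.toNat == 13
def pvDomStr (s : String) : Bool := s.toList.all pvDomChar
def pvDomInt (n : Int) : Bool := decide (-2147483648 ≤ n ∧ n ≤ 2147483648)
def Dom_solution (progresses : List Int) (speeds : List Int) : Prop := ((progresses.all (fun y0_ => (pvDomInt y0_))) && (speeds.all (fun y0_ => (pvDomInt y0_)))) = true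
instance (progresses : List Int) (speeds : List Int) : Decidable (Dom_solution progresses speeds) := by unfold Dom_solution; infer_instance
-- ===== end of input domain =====

-- B drops A's run-counting accumulator: it assigns every task its effective deployment day
-- (prefix maximum of the per-task ceil days) and returns the values of an insertion-ordered
-- dict counting tasks per effective day; objective: alternative algorithm, same cost.

-- ===== PORT A =====
-- loop body of A's second for-loop ('if stack[i] <= core: cnt += 1 else: append cnt; reset')
def Astep (st : Int × Int × List Int) (x : Int) : Int × Int × List Int :=
  if x ≤ st.2.1 then (st.1 + 1, st.2.1, st.2.2) else (1, x, st.2.2 ++ [st.1])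

def solution (progresses : List Int) (speeds : List Int) : List Int :=
  let stack := (PySem.List.pyRange 0 (progresses.length : Int) 1).foldl
    (fun stack i =>
      let sub := 100 - PySem.List.pyGetD progresses i 0
      let sp := PySem.List.pyGetD speeds i 1
      let tmp := PySem.Int.floordiv sub sp
      let tmp := if PySem.Int.mod sub sp ≠ 0 then tmp + 1 else tmp
      stack ++ [tmp]) []
  let core := PySem.List.pyGetD stack 0 0      -- stack[0]: IndexError on empty input, excluded by Pre_
  let st := (PySem.List.pyRange 1 (stack.length : Int) 1).foldl
    (fun st i => Astep st (PySem.List.pyGetD stack i 0)) (1, core, [])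
  st.2.2 ++ [st.1]

-- ===== PORT B =====
def solution_alt (progresses : List Int) (speeds : List Int) : List Int :=
  let st := (progresses.zip speeds).foldl
    (fun (st : Option Int × List Int) ps =>
      let d := -(PySem.Int.floordiv (ps.1 - 100) ps.2)
      let m := match st.1 with
        | none => d
        | some m0 => if d > m0 then d else m0
      (some m, st.2 ++ [m])) (none, [])
  let effective := st.2
  let counts := effective.foldl (fun d e => d.insert e (d.getD e 0 + 1)) PySem.Dict.empty
  counts.values

-- ===== PRECONDITION & SPEC =====
-- Pre_ excludes exactly the inputs where A raises: empty progresses (IndexError on stack[0]),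
-- speeds shorter than progresses (IndexError on speeds[i]), and a zero speed (ZeroDivisionError).
def Pre_solution (progresses : List Int) (speeds : List Int) : Prop :=
  progresses ≠ [] ∧ progresses.length ≤ speeds.length ∧
    ∀ s ∈ speeds.take progresses.length, s ≠ 0
instance (progresses : List Int) (speeds : List Int) : Decidable (Pre_solution progresses speeds) := by
  unfold Pre_solution; infer_instance

def pvWitness_solution : List Int × List Int := ([30, 95], [5, 10])

def Spec_solution (progresses : List Int) (speeds : List Int) (out : List Int) : Prop := out = solution_alt progresses speeds
instance (progresses : List Int) (speeds : List Int) (out : List Int) : Decidable (Spec_solution progresses speeds out) := by unfold Spec_solution; infer_instance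

-- ===== CLAIM (what is proved, stated in full; the proofs are below) =====
def Claim_equal_solution : Prop := ∀ (progresses : List Int) (speeds : List Int), Dom_solution progresses speeds → Pre_solution progresses speeds → Spec_solution progresses speeds (solution progresses speeds)

-- ===== LEMMAS AND PROOFS =====

-- run lengths of the day list, relative to a current leader and a running count
def rl (core cnt : Int) : List Int → List Int
  | [] => [cnt]
  | x :: t => if x ≤ core then rl core (cnt + 1) t else cnt :: rl x 1 t

-- prefix-maximum tail: pm c xs = the effective days of xs after a prefix whose max is c
def pm (c : Int) : List Int → List Int
  | [] => []
  | x :: t => (if x > c then x else c) :: pm (if x > c then x else c) t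

lemma le_of_mem_pm (t : List Int) : ∀ (c y : Int), y ∈ pm c t → c ≤ y := by
  induction t with
  | nil => intro c y h; simp [pm] at h
  | cons x t ih =>
      intro c y h
      simp only [pm, List.mem_cons] at h
      rcases h with rfl | h
      · split <;> omega
      · have := ih _ y h
        split at this <;> omega

-- A's grouping fold computes the run lengths
lemma A_rl (xs : List Int) : ∀ (cnt core : Int) (ans : List Int),
    (xs.foldl Astep (cnt, core, ans)).2.2 ++ [(xs.foldl Astep (cnt, core, ans)).1]
      = ans ++ rl core cnt xs := by
  induction xs with
  | nil => intro cnt core ans; simp [rl]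
  | cons x t ih =>
      intro cnt core ans
      by_cases h : x ≤ core
      · simp only [List.foldl_cons, Astep, if_pos h, rl]
        rw [ih]
      · simp only [List.foldl_cons, Astep, if_neg h, rl]
        rw [ih]
        simp


-- ceiling division: A's floor-and-bump equals B's negated floor division
lemma ceil_pos (a s : Int) (hs : 0 < s) :
    (if PySem.Int.mod a s ≠ 0 then PySem.Int.floordiv a s + 1 else PySem.Int.floordiv a s)
      = -(PySem.Int.floordiv (-a) s) := by
  have hq := (PySem.Int.floordiv_eq_iff_of_pos (a := a) (b := s) hs).mp rfl
  have hfm := PySem.Int.floordiv_mul_add_mod a s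
  have hm0 : 0 ≤ PySem.Int.mod a s := PySem.Int.mod_nonneg a hs
  have hml : PySem.Int.mod a s < s := PySem.Int.mod_lt a hs
  by_cases h : PySem.Int.mod a s = 0
  · simp only [h, ne_eq, not_true_eq_false, if_false]
    rw [eq_comm, PySem.Int.neg_floordiv_neg_eq_iff_of_pos hs]
    refine ⟨by nlinarith, by nlinarith⟩
  · have hmpos : 0 < PySem.Int.mod a s := lt_of_le_of_ne hm0 (Ne.symm h)
    simp only [ne_eq, h, not_false_eq_true, if_true]
    rw [eq_comm, PySem.Int.neg_floordiv_neg_eq_iff_of_pos hs]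
    refine ⟨by nlinarith, by nlinarith [hq.2]⟩

lemma ceil_all (a s : Int) (hs : s ≠ 0) :
    (if PySem.Int.mod a s ≠ 0 then PySem.Int.floordiv a s + 1 else PySem.Int.floordiv a s)
      = -(PySem.Int.floordiv (-a) s) := by
  rcases lt_or_gt_of_ne hs with hneg | hpos
  · have h1 : PySem.Int.floordiv a s = PySem.Int.floordiv (-a) (-s) := by
      rw [← PySem.Int.floordiv_neg_neg]
    have h2 : PySem.Int.floordiv (-a) s = PySem.Int.floordiv a (-s) := by
      rw [← PySem.Int.floordiv_neg_neg]; simp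
    have h3 : PySem.Int.mod a s = -PySem.Int.mod (-a) (-s) := by
      rw [← PySem.Int.mod_neg_neg]; simp
    rw [h1, h2, h3]
    have := ceil_pos (-a) (-s) (by omega)
    simp only [neg_neg] at this
    rcases eq_or_ne (PySem.Int.mod (-a) (-s)) 0 with hm | hm <;> simp [hm] at this ⊢ <;> omega
  · exact ceil_pos a s hpos

-- A's first loop builds exactly the day list
lemma stack_eq (pr sp : List Int) (hlen : pr.length ≤ sp.length)
    (hz : ∀ s ∈ sp.take pr.length, s ≠ 0) :
    (PySem.List.pyRange 0 (pr.length : Int) 1).foldl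
      (fun stack i =>
        let sub := 100 - PySem.List.pyGetD pr i 0
        let s := PySem.List.pyGetD sp i 1
        let tmp := PySem.Int.floordiv sub s
        let tmp := if PySem.Int.mod sub s ≠ 0 then tmp + 1 else tmp
        stack ++ [tmp]) []
    = (pr.zip sp).map (fun ps => -(PySem.Int.floordiv (ps.1 - 100) ps.2)) := by
  rw [PySem.List.foldl_append_singleton_eq_map]
  rw [PySem.List.pyRange_one]
  simp only [Int.sub_zero, Int.toNat_natCast, List.map_map]
  apply List.ext_getElem
  · simp [List.length_zip]; omega
  · intro k hk1 hk2
    have hkpr : k < pr.length := by simpa using hk1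
    have hksp : k < sp.length := by omega
    have hs0 : sp[k] ≠ 0 := by
      apply hz
      rw [List.mem_take_iff_getElem]
      exact ⟨k, by omega, rfl⟩
    simp only [List.nil_append, List.getElem_map, List.getElem_range, Function.comp_apply,
      List.getElem_zip]
    have hpg : PySem.List.pyGetD pr ((0 : Int) + (k : Int)) 0 = pr[k] := by
      rw [zero_add, PySem.List.pyGetD_natCast]
      exact List.getD_eq_getElem pr 0 hkpr
    have hsg : PySem.List.pyGetD sp ((0 : Int) + (k : Int)) 1 = sp[k] := by
      rw [zero_add, PySem.List.pyGetD_natCast]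
      exact List.getD_eq_getElem sp 1 hksp
    simp only [hpg, hsg]
    have := ceil_all (100 - pr[k]) sp[k] hs0
    rw [show -(100 - pr[k]) = pr[k] - 100 by ring] at this
    exact this


-- B's prefix-max fold, named (used only by the proofs)
def Bstep (st : Option Int × List Int) (d : Int) : Option Int × List Int :=
  let m := match st.1 with
    | none => d
    | some m0 => if d > m0 then d else m0
  (some m, st.2 ++ [m])

lemma pm_fold (xs : List Int) : ∀ (m : Int) (acc : List Int),
    (xs.foldl Bstep (some m, acc)).2 = acc ++ pm m xs := by
  induction xs with
  | nil => intro m acc; simp [pm]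
  | cons x t ih =>
      intro m acc
      simp only [List.foldl_cons, Bstep, pm]
      rw [ih]
      by_cases h : x > m
      · simp [if_pos h]
      · simp [if_neg h]

-- counting the effective list (n copies of the leader, then the prefix-max tail) gives run lengths
lemma count_pm (rest : List Int) : ∀ (c : Int) (n : Nat), 0 < n →
    (PySem.Set.ofList (List.replicate n c ++ pm c rest)).map
        (fun k => ((List.replicate n c ++ pm c rest).count k : Int))
      = rl c (n : Int) rest := by
  induction rest with
  | nil =>
      intro c n hn
      obtain ⟨n', rfl⟩ := Nat.exists_eq_succ_of_ne_zero (Nat.pos_iff_ne_zero.mp hn)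
      have hof : PySem.Set.ofList (List.replicate (n' + 1) c) = [c] := by
        induction n' with
        | zero => rfl
        | succ k ihk =>
            rw [List.replicate_succ', PySem.Set.ofList_append_singleton, ihk (Nat.succ_pos k)]
            simp [PySem.Set.add_of_mem]
      simp only [pm, List.append_nil, hof, List.map_cons, List.map_nil, List.count_replicate, rl]
      simp
  | cons x t ih =>
      intro c n hn
      by_cases h : x > c
      · -- new leader x: the old leader's block closes with count n
        have hpm : pm c (x :: t) = x :: pm x t := by simp [pm, if_pos h]
        rw [hpm]
        have hS : (x :: pm x t) = List.replicate 1 x ++ pm x t := by simp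
        have hgt : ∀ y ∈ x :: pm x t, c < y := by
          intro y hy
          rcases List.mem_cons.mp hy with rfl | hy
          · exact h
          · have := le_of_mem_pm t x y hy; omega
        have hcnot : c ∉ x :: pm x t := fun hc => absurd (hgt c hc) (lt_irrefl c)
        have hof : PySem.Set.ofList (List.replicate n c ++ (x :: pm x t))
            = c :: PySem.Set.ofList (x :: pm x t) := by
          rw [PySem.Set.ofList_append]
          have hrep : PySem.Set.ofList (List.replicate n c) = [c] := by
            obtain ⟨n', rfl⟩ := Nat.exists_eq_succ_of_ne_zero (Nat.pos_iff_ne_zero.mp hn)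
            induction n' with
            | zero => rfl
            | succ k ihk =>
                rw [List.replicate_succ', PySem.Set.ofList_append_singleton, ihk (Nat.succ_pos k)]
                simp [PySem.Set.add_of_mem]
          rw [hrep, PySem.Set.update_eq_append_filter]
          have hfil : (PySem.Set.ofList (x :: pm x t)).filter
              (fun y => !PySem.Set.contains [c] y) = PySem.Set.ofList (x :: pm x t) := by
            rw [List.filter_eq_self]
            intro y hy
            have hyS : y ∈ x :: pm x t := (PySem.Set.mem_ofList _ _).mp hy
            have : c < y := hgt y hyS
            simp [PySem.Set.contains]
            omega
          rw [hfil]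
          rfl
        rw [hof, List.map_cons]
        have hc0 : (x :: pm x t).count c = 0 := List.count_eq_zero.mpr hcnot
        have hcc : ((List.replicate n c ++ (x :: pm x t)).count c : Int) = (n : Int) := by
          rw [List.count_append, hc0, List.count_replicate]
          simp
        rw [hcc]
        have hmap : (PySem.Set.ofList (x :: pm x t)).map
              (fun k => (((List.replicate n c ++ (x :: pm x t)).count k : Nat) : Int))
            = (PySem.Set.ofList (x :: pm x t)).map
              (fun k => (((x :: pm x t).count k : Nat) : Int)) := by
          apply List.map_congr_left
          intro k hk
          have hkS : k ∈ x :: pm x t := (PySem.Set.mem_ofList _ _).mp hk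
          have hkc : ¬ (c = k) := by have := hgt k hkS; omega
          rw [List.count_append, List.count_replicate]
          simp [hkc]
        rw [hmap, hS, ih x 1 Nat.one_pos]
        simp only [rl, if_neg (by omega : ¬ x ≤ c)]
        norm_num
      · -- x folds into the current block
        have hpm : pm c (x :: t) = c :: pm c t := by simp [pm, if_neg h]
        rw [hpm]
        have hmerge : List.replicate n c ++ (c :: pm c t)
            = List.replicate (n + 1) c ++ pm c t := by
          rw [List.replicate_succ']
          simp
        rw [hmerge, ih c (n + 1) (Nat.succ_pos n)]
        simp only [rl, if_pos (by omega : x ≤ c)]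
        norm_num

-- ===== VERDICT (by name: the statement is the Claim_ definition above) =====
theorem solution_spec : Claim_equal_solution := by
  intro pr sp _hdom hpre
  obtain ⟨hne, hlen, hz⟩ := hpre
  show solution pr sp = solution_alt pr sp
  simp only [solution, solution_alt]
  rw [stack_eq pr sp hlen hz]
  have hB : (pr.zip sp).foldl
      (fun (st : Option Int × List Int) ps =>
        let d := -(PySem.Int.floordiv (ps.1 - 100) ps.2)
        let m := match st.1 with
          | none => d
          | some m0 => if d > m0 then d else m0
        (some m, st.2 ++ [m])) (none, [])
    = ((pr.zip sp).map (fun ps => -(PySem.Int.floordiv (ps.1 - 100) ps.2))).foldl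
        Bstep (none, []) := by
    rw [List.foldl_map]
    rfl
  rw [hB]
  set ds := (pr.zip sp).map (fun ps => -(PySem.Int.floordiv (ps.1 - 100) ps.2)) with hds
  have hdsne : ds ≠ [] := by
    have h1 : 0 < pr.length := List.length_pos_iff.mpr hne
    have h2 : ds.length = min pr.length sp.length := by
      rw [hds]; simp [List.length_zip]
    exact List.ne_nil_of_length_pos (by omega)
  clear_value ds
  obtain ⟨d, rest, rfl⟩ := List.exists_cons_of_ne_nil hdsne
  -- A side: the second loop over pyRange/pyGetD is a foldl over the tail, then run lengths
  rw [PySem.List.foldl_pyRange_pyGetD' (d :: rest) 0 Astep _ (by omega)]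
  simp only [PySem.List.pyGetD_zero_cons, Int.toNat_one, List.drop_succ_cons, List.drop_zero]
  rw [A_rl rest 1 d []]
  -- B side: effective days, then the counter's values
  have hE : ((d :: rest).foldl Bstep (none, [])).2 = d :: pm d rest := by
    simp only [List.foldl_cons, Bstep]
    exact pm_fold rest d [d]
  rw [hE]
  rw [PySem.Dict.foldl_insert_getD_add_one_eq_counter]
  have hv : (PySem.Dict.counter (d :: pm d rest)).values
      = (PySem.Set.ofList (d :: pm d rest)).map
          (fun k => (((d :: pm d rest).count k : Nat) : Int)) := by
    simp only [PySem.Dict.values, PySem.Dict.items_counter, List.map_map]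
    rfl
  rw [hv]
  have := count_pm rest d 1 Nat.one_pos
  simp only [List.replicate_one, List.singleton_append] at this
  rw [this]
  simp
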